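-- pv_equiv track=rewrite | github.com/alikhalilli/Algorithms | Arrays/Arrangement/RearrangeEvenOdd.py | rearrangeOddEven
-- ===== SOURCE A (Python) =====
-- def swap(arr, e1, e2):
--     temp = arr[e2]
--     arr[e2] = arr[e1]
--     arr[e1] = temp
--
-- def rearrangeOddEven(arr):
--     n = len(arr)
--     for i in range(n):
--         m = i % 2
--         for j in range(m, n-m, 2):
--             if m == 0:
--                 if arr[i] > arr[j]:
--                     swap(arr, i, j)
--             else:
--                 if arr[i] < arr[j]:
--                     swap(arr, i, j)
--     return arr
-- ===== SOURCE B (Python) =====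
-- def rearrangeOddEven(arr):
--     evens = sorted(arr[0::2], reverse=True)
--     odds = sorted(arr[1::2])
--     arr[0::2] = evens
--     arr[1::2] = odds
--     return arr
-- ===== Notes on version B (the rewrite author's own statement) =====
-- stated objective: faster
-- what changed: A's O(n^2) nested same-parity selection-swap rescanning is replaced by extracting the even- and odd-index subsequences with slices, sorting them with the builtin sort (descending / ascending), and writing them back in place via slice assignment.
import Mathlib
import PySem

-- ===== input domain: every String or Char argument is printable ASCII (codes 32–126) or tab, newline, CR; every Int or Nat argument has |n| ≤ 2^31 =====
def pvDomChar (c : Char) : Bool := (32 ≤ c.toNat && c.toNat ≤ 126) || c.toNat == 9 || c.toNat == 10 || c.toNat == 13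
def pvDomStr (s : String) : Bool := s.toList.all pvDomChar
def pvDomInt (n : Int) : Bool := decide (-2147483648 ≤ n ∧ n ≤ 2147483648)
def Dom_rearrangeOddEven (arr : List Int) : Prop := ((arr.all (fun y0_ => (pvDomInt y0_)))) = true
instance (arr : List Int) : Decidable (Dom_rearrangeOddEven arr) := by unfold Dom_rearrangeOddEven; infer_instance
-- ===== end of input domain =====

-- B replaces A's O(n^2) nested same-parity selection-swap loops by sorting the two
-- parity subsequences with the builtin sort and writing them back in place (faster).
-- A and B both mutate the Python argument in place and return it; the same final
-- list is returned (and left in arr) by both, so the equivalence proved on the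
-- return value covers the in-place effect too.

-- ===== PORT A =====
def pvSwap (arr : List Int) (e1 e2 : Int) : List Int :=
  let temp := PySem.List.pyGetD arr e2 0
  let arr1 := PySem.List.pySetD arr e2 (PySem.List.pyGetD arr e1 0)
  PySem.List.pySetD arr1 e1 temp

def rearrangeOddEven (arr : List Int) : List Int :=
  let n : Int := arr.length
  (PySem.List.pyRange 0 n 1).foldl (fun a i =>
    let m := PySem.Int.mod i 2
    (PySem.List.pyRange m (n - m) 2).foldl (fun a j =>
      if m == 0 then
        if PySem.List.pyGetD a i 0 > PySem.List.pyGetD a j 0 then pvSwap a i j else a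
      else
        if PySem.List.pyGetD a i 0 < PySem.List.pyGetD a j 0 then pvSwap a i j else a) a) arr

-- ===== PORT B =====
-- the two slice assignments arr[0::2] = evens; arr[1::2] = odds are ported by hand
-- as an exact interleave (the lengths always match, so this is exact)
def pvInterleave : List Int → List Int → List Int
  | [], o => o
  | x :: es, o => x :: pvInterleave o es
termination_by e o => e.length + o.length
decreasing_by simp; omega

def rearrangeOddEven_alt (arr : List Int) : List Int :=
  let evens := PySem.List.sorted ((PySem.List.slice? arr (some 0) none 2).getD []) (fun x => x) true
  let odds := PySem.List.sorted ((PySem.List.slice? arr (some 1) none 2).getD []) (fun x => x) false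
  pvInterleave evens odds

-- ===== PRECONDITION & SPEC =====
def Spec_rearrangeOddEven (arr : List Int) (out : List Int) : Prop := out = rearrangeOddEven_alt arr
instance (arr : List Int) (out : List Int) : Decidable (Spec_rearrangeOddEven arr out) := by unfold Spec_rearrangeOddEven; infer_instance

-- ===== CLAIM (what is proved, stated in full; the proofs are below) =====
def Claim_equal_rearrangeOddEven : Prop := ∀ (arr : List Int), Dom_rearrangeOddEven arr → Spec_rearrangeOddEven arr (rearrangeOddEven arr)

-- ===== LEMMAS AND PROOFS =====

-- proof-side model of A: a generic in-place "compare with position i and swap" pass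
def pqSwap (a : List Int) (i j : Nat) : List Int := (a.set j (a.getD i 0)).set i (a.getD j 0)

def pqStep (le : Int → Int → Bool) (i : Nat) (a : List Int) (j : Nat) : List Int :=
  if le (a.getD j 0) (a.getD i 0) then a else pqSwap a i j

def pqInner (le : Int → Int → Bool) (i m : Nat) (a : List Int) : List Int :=
  (List.range m).foldl (pqStep le i) a

def pqSort (le : Int → Int → Bool) (m cnt : Nat) (a : List Int) : List Int :=
  (List.range cnt).foldl (fun x i => pqInner le i m x) a

def pqLeD (x y : Int) : Bool := decide (y ≤ x)
def pqLeA (x y : Int) : Bool := decide (x ≤ y)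

-- de-interleave a list into its even- and odd-index subsequences
def pqDe : List Int → List Int × List Int
  | [] => ([], [])
  | x :: xs => (x :: (pqDe xs).2, (pqDe xs).1)

-- one outer iteration of port A at array index k, array length N
def pqAStep (N : Nat) (a : List Int) (k : Nat) : List Int :=
  let i : Int := (k : Int)
  let m := PySem.Int.mod i 2
  (PySem.List.pyRange m ((N : Int) - m) 2).foldl (fun a j =>
    if m == 0 then
      if PySem.List.pyGetD a i 0 > PySem.List.pyGetD a j 0 then pvSwap a i j else a
    else
      if PySem.List.pyGetD a i 0 < PySem.List.pyGetD a j 0 then pvSwap a i j else a) a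

def pqSortedPre (le : Int → Int → Bool) (a : List Int) (k : Nat) : Prop :=
  ∀ p q, p < q → q < k → le (a.getD p 0) (a.getD q 0) = true

theorem pvInterleave_nil (o : List Int) : pvInterleave [] o = o := by
  rw [pvInterleave]

theorem pvInterleave_cons (x : Int) (es o : List Int) :
    pvInterleave (x :: es) o = x :: pvInterleave o es := by
  rw [pvInterleave]

theorem pqDe_len : ∀ l : List Int,
    (pqDe l).1.length = (l.length + 1) / 2 ∧ (pqDe l).2.length = l.length / 2 := by
  intro l; induction l with
  | nil => simp [pqDe]
  | cons x xs ih => simp [pqDe]; omega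

theorem pvInterleave_pqDe : ∀ l : List Int, pvInterleave (pqDe l).1 (pqDe l).2 = l := by
  intro l; induction l with
  | nil => simp [pqDe, pvInterleave_nil]
  | cons x xs ih => simp [pqDe, pvInterleave_cons, ih]

theorem pqDe_get : ∀ (l : List Int) (k : Nat),
    (pqDe l).1[k]? = l[2 * k]? ∧ (pqDe l).2[k]? = l[2 * k + 1]? := by
  intro l; induction l with
  | nil => intro k; simp [pqDe]
  | cons x xs ih =>
    intro k
    constructor
    · cases k with
      | zero => simp [pqDe]
      | succ k =>
        have h2 : 2 * (k + 1) = (2 * k + 1) + 1 := by omega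
        rw [show 2 * (k + 1) = (2 * k + 1) + 1 from h2]
        simp only [pqDe, List.getElem?_cons_succ]
        exact (ih k).2
    · have h2 : 2 * k + 1 = (2 * k) + 1 := rfl
      simp only [pqDe, h2, List.getElem?_cons_succ]
      exact (ih k).1

theorem pvInterleave_getD : ∀ (n : Nat) (e o : List Int), e.length + o.length ≤ n →
    o.length ≤ e.length → e.length ≤ o.length + 1 →
    (∀ (k : Nat) (d : Int), k < e.length → (pvInterleave e o).getD (2 * k) d = e.getD k d) ∧
    (∀ (k : Nat) (d : Int), k < o.length → (pvInterleave e o).getD (2 * k + 1) d = o.getD k d) := by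
  intro n
  induction n with
  | zero =>
    intro e o hn _ _
    constructor <;> intro k d hk <;> omega
  | succ n ih =>
    intro e o hn h1 h2
    cases e with
    | nil =>
      have ho : o = [] := by simpa using h1
      subst ho
      constructor <;> intro k d hk <;> simp at hk
    | cons x es =>
      have ih' := ih o es (by simp at hn ⊢; omega) (by simp at h2 ⊢; omega) (by simp at h1 ⊢; omega)
      rw [pvInterleave_cons]
      constructor
      · intro k d hk
        cases k with
        | zero => simp
        | succ k =>
          have h3 : 2 * (k + 1) = (2 * k + 1) + 1 := by omega
          rw [h3, List.getD_cons_succ, List.getD_cons_succ]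
          exact ih'.2 k d (by simp at hk; omega)
      · intro k d hk
        rw [List.getD_cons_succ]
        exact ih'.1 k d (by omega)

theorem pvInterleave_set : ∀ (n : Nat) (e o : List Int), e.length + o.length ≤ n →
    o.length ≤ e.length → e.length ≤ o.length + 1 →
    (∀ (k : Nat) (v : Int), k < e.length → (pvInterleave e o).set (2 * k) v = pvInterleave (e.set k v) o) ∧
    (∀ (k : Nat) (v : Int), k < o.length → (pvInterleave e o).set (2 * k + 1) v = pvInterleave e (o.set k v)) := by
  intro n
  induction n with
  | zero =>
    intro e o hn _ _
    constructor <;> intro k v hk <;> omega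
  | succ n ih =>
    intro e o hn h1 h2
    cases e with
    | nil =>
      have ho : o = [] := by simpa using h1
      subst ho
      constructor <;> intro k v hk <;> simp at hk
    | cons x es =>
      have ih' := ih o es (by simp at hn ⊢; omega) (by simp at h2 ⊢; omega) (by simp at h1 ⊢; omega)
      rw [pvInterleave_cons]
      constructor
      · intro k v hk
        cases k with
        | zero => simp [pvInterleave_cons]
        | succ k =>
          have h3 : 2 * (k + 1) = (2 * k + 1) + 1 := by omega
          rw [h3, List.set_cons_succ, ih'.2 k v (by simp at hk; omega),
            List.set_cons_succ, pvInterleave_cons]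
      · intro k v hk
        rw [List.set_cons_succ, ih'.1 k v (by omega), pvInterleave_cons]

theorem length_pqStep (le : Int → Int → Bool) (i : Nat) (a : List Int) (j : Nat) :
    (pqStep le i a j).length = a.length := by
  unfold pqStep pqSwap; split <;> simp

theorem length_foldl_pqStep (le : Int → Int → Bool) (i : Nat) :
    ∀ (l : List Nat) (a : List Int), (l.foldl (pqStep le i) a).length = a.length := by
  intro l
  induction l with
  | nil => intro a; rfl
  | cons x xs ih => intro a; rw [List.foldl_cons, ih, length_pqStep]

theorem pqSwap_getD (a : List Int) (i j p : Nat) (hi : i < a.length) (hj : j < a.length)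
    (hp : p < a.length) :
    (pqSwap a i j).getD p 0 =
      if p = i then a.getD j 0 else if p = j then a.getD i 0 else a.getD p 0 := by
  unfold pqSwap
  rw [List.getD_eq_getElem _ _ (by simpa using hp), List.getElem_set, List.getElem_set]
  split_ifs <;> first
    | rfl
    | omega
    | (rw [List.getD_eq_getElem _ _ hp])

theorem pqSwap_perm (a : List Int) (i j : Nat) (hi : i < a.length) (hj : j < a.length) :
    (pqSwap a i j).Perm a := by
  rw [List.perm_iff_count]
  intro c
  unfold pqSwap
  rw [List.getD_eq_getElem _ _ hi, List.getD_eq_getElem _ _ hj]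
  rw [List.count_set (by simpa using hi), List.count_set hj]
  rw [List.getElem_set]
  have hji : (if j = i then a[i] else a[i]) = a[i] := by split <;> rfl
  rw [hji]
  have h2 : a[j] ∈ a := List.getElem_mem hj
  have hcj : a[j] = c → 0 < List.count c a := fun h => List.count_pos_iff.mpr (h ▸ h2)
  simp only [beq_iff_eq]
  split_ifs with u v v <;> first | omega | (have := hcj u; omega)

theorem pqSortedPre_pairwise (le : Int → Int → Bool) (a : List Int)
    (h : pqSortedPre le a a.length) : List.Pairwise (fun x y => le x y = true) a := by
  rw [List.pairwise_iff_getElem]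
  intro p q hp hq hpq
  have := h p q hpq hq
  rwa [List.getD_eq_getElem _ _ hp, List.getD_eq_getElem _ _ hq] at this

theorem le_refl_of_tot (le : Int → Int → Bool) (htot : ∀ x y, le x y = true ∨ le y x = true)
    (x : Int) : le x x = true := by rcases htot x x with h | h <;> exact h

theorem pqInner_inv (le : Int → Int → Bool)
    (htot : ∀ x y, le x y = true ∨ le y x = true)
    (htrans : ∀ x y z, le x y = true → le y z = true → le x z = true)
    (i m : Nat) (a : List Int) (hin : i < a.length) (hm : m ≤ a.length)
    (hs : pqSortedPre le a i) :
    ∀ J, J ≤ m →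
      ((List.range J).foldl (pqStep le i) a).Perm a ∧
      pqSortedPre le ((List.range J).foldl (pqStep le i) a) i ∧
      (∀ p, p < J → p < i →
        le (((List.range J).foldl (pqStep le i) a).getD p 0)
           (((List.range J).foldl (pqStep le i) a).getD i 0) = true) := by
  intro J
  induction J with
  | zero =>
    intro _
    refine ⟨List.Perm.refl a, hs, ?_⟩
    intro p hp _; omega
  | succ J ihJ =>
    intro hJ
    obtain ⟨hperm, hsort, hdom⟩ := ihJ (by omega)
    set b := (List.range J).foldl (pqStep le i) a with hbdef
    have hlen : b.length = a.length := hperm.length_eq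
    have hilen : i < b.length := by omega
    have hJlen : J < b.length := by omega
    rw [List.range_succ, List.foldl_append, List.foldl_cons, List.foldl_nil, ← hbdef]
    by_cases hc : le (b.getD J 0) (b.getD i 0) = true
    · rw [pqStep, if_pos hc]
      refine ⟨hperm, hsort, ?_⟩
      intro p hp hpi
      rcases Nat.lt_or_ge p J with h | h
      · exact hdom p h hpi
      · have hpJ : p = J := by omega
        subst hpJ; exact hc
    · rw [pqStep, if_neg hc]
      have hJi : J ≠ i := by
        intro h; subst h; exact hc (le_refl_of_tot le htot _)
      have hiJ : le (b.getD i 0) (b.getD J 0) = true := by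
        rcases htot (b.getD J 0) (b.getD i 0) with h | h
        · exact absurd h hc
        · exact h
      have hg : ∀ p, p < b.length → (pqSwap b i J).getD p 0 =
          if p = i then b.getD J 0 else if p = J then b.getD i 0 else b.getD p 0 :=
        fun p hp => pqSwap_getD b i J p hilen hJlen hp
      refine ⟨(pqSwap_perm b i J hilen hJlen).trans hperm, ?_, ?_⟩
      · intro p q hpq hq
        have hpl : p < b.length := by omega
        have hql : q < b.length := by omega
        have hvp : (pqSwap b i J).getD p 0 = if p = J then b.getD i 0 else b.getD p 0 := by
          rw [hg p hpl, if_neg (show ¬ p = i by omega)]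
        have hvq : (pqSwap b i J).getD q 0 = if q = J then b.getD i 0 else b.getD q 0 := by
          rw [hg q hql, if_neg (show ¬ q = i by omega)]
        rw [hvp, hvq]
        by_cases hpJ : p = J <;> by_cases hqJ : q = J
        · omega
        · rw [if_pos hpJ, if_neg hqJ]
          exact htrans _ _ _ hiJ (hsort J q (by omega) (by omega))
        · rw [if_neg hpJ, if_pos hqJ]
          exact hdom p (by omega) (by omega)
        · rw [if_neg hpJ, if_neg hqJ]
          exact hsort p q hpq hq
      · intro p hp hpi
        have hpl : p < b.length := by omega
        have hvi : (pqSwap b i J).getD i 0 = b.getD J 0 := by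
          rw [hg i hilen, if_pos rfl]
        have hvp : (pqSwap b i J).getD p 0 = if p = J then b.getD i 0 else b.getD p 0 := by
          rw [hg p hpl, if_neg (show ¬ p = i by omega)]
        rw [hvp, hvi]
        by_cases hpJ : p = J
        · rw [if_pos hpJ]; exact hiJ
        · rw [if_neg hpJ]
          rcases Nat.lt_or_ge J i with hJlt | hJge
          · exact hsort p J (by omega) hJlt
          · exact htrans _ _ _ (hdom p (by omega) hpi) hiJ

theorem pqInner_spec (le : Int → Int → Bool)
    (htot : ∀ x y, le x y = true ∨ le y x = true)
    (htrans : ∀ x y z, le x y = true → le y z = true → le x z = true)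
    (i m : Nat) (a : List Int) (hi : i ≤ m) (hin : i < a.length) (hm : m ≤ a.length)
    (hs : pqSortedPre le a i) :
    (pqInner le i m a).Perm a ∧ pqSortedPre le (pqInner le i m a) (i + 1) := by
  obtain ⟨hperm, hsort, hdom⟩ := pqInner_inv le htot htrans i m a hin hm hs m (Nat.le_refl m)
  refine ⟨hperm, ?_⟩
  intro p q hpq hq
  rcases Nat.lt_or_ge q i with h | h
  · exact hsort p q hpq h
  · have hqi : q = i := by omega
    subst hqi
    exact hdom p (by omega) hpq

theorem pqSort_spec (le : Int → Int → Bool)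
    (htot : ∀ x y, le x y = true ∨ le y x = true)
    (htrans : ∀ x y z, le x y = true → le y z = true → le x z = true)
    (m cnt : Nat) (a : List Int) (hm : m ≤ a.length) (hcnt : cnt = a.length)
    (hcm : cnt ≤ m + 1) :
    (pqSort le m cnt a).Perm a ∧ pqSortedPre le (pqSort le m cnt a) cnt := by
  suffices h : ∀ C, C ≤ cnt →
      ((List.range C).foldl (fun x i => pqInner le i m x) a).Perm a ∧
      pqSortedPre le ((List.range C).foldl (fun x i => pqInner le i m x) a) C by
    exact h cnt (Nat.le_refl cnt)
  intro C
  induction C with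
  | zero =>
    intro _
    exact ⟨List.Perm.refl a, fun p q hpq hq => by omega⟩
  | succ C ihC =>
    intro hC
    obtain ⟨hperm, hsort⟩ := ihC (by omega)
    set b := (List.range C).foldl (fun x i => pqInner le i m x) a with hbdef
    have hlen : b.length = a.length := hperm.length_eq
    rw [List.range_succ, List.foldl_append, List.foldl_cons, List.foldl_nil, ← hbdef]
    obtain ⟨hp2, hs2⟩ := pqInner_spec le htot htrans C m b (by omega) (by omega) (by omega) hsort
    exact ⟨hp2.trans hperm, hs2⟩


theorem pqSort_succ (le : Int → Int → Bool) (m c : Nat) (a : List Int) :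
    pqSort le m (c + 1) a = pqInner le c m (pqSort le m c a) := by
  unfold pqSort
  rw [List.range_succ, List.foldl_append, List.foldl_cons, List.foldl_nil]

theorem length_pqInner (le : Int → Int → Bool) (i m : Nat) (a : List Int) :
    (pqInner le i m a).length = a.length := length_foldl_pqStep le i _ a

theorem length_pqSort (le : Int → Int → Bool) (m : Nat) :
    ∀ (cnt : Nat) (a : List Int), (pqSort le m cnt a).length = a.length := by
  intro cnt
  induction cnt with
  | zero => intro a; rfl
  | succ c ih => intro a; rw [pqSort_succ, length_pqInner, ih]

theorem htotD : ∀ x y, pqLeD x y = true ∨ pqLeD y x = true := by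
  intro x y; simp [pqLeD]; omega

theorem htransD : ∀ x y z, pqLeD x y = true → pqLeD y z = true → pqLeD x z = true := by
  intro x y z; simp [pqLeD]; omega

theorem htotA : ∀ x y, pqLeA x y = true ∨ pqLeA y x = true := by
  intro x y; simp [pqLeA]; omega

theorem htransA : ∀ x y z, pqLeA x y = true → pqLeA y z = true → pqLeA x z = true := by
  intro x y z; simp [pqLeA]; omega

theorem stepE_comm (e o : List Int) (hs1 : o.length ≤ e.length) (hs2 : e.length ≤ o.length + 1)
    (i j : Nat) (hi : i < e.length) (hj : j < e.length) :
    (if PySem.List.pyGetD (pvInterleave e o) ((2 * i : Nat) : Int) 0 >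
        PySem.List.pyGetD (pvInterleave e o) ((2 * j : Nat) : Int) 0
     then pvSwap (pvInterleave e o) ((2 * i : Nat) : Int) ((2 * j : Nat) : Int)
     else pvInterleave e o)
    = pvInterleave (pqStep pqLeD i e j) o := by
  have hget := (pvInterleave_getD (e.length + o.length) e o (Nat.le_refl _) hs1 hs2).1
  have hset := (pvInterleave_set (e.length + o.length) e o (Nat.le_refl _) hs1 hs2).1
  have hset' := (pvInterleave_set (e.length + o.length) (e.set j (e.getD i 0)) o
      (by simp) (by simpa using hs1) (by simpa using hs2)).1
  have hgi : PySem.List.pyGetD (pvInterleave e o) ((2 * i : Nat) : Int) 0 = e.getD i 0 := by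
    rw [PySem.List.pyGetD_natCast]
    have := hget i 0 hi
    rwa [List.getD_eq_getElem?_getD, List.getD_eq_getElem?_getD] at this ⊢
  have hgj : PySem.List.pyGetD (pvInterleave e o) ((2 * j : Nat) : Int) 0 = e.getD j 0 := by
    rw [PySem.List.pyGetD_natCast]
    have := hget j 0 hj
    rwa [List.getD_eq_getElem?_getD, List.getD_eq_getElem?_getD] at this ⊢
  rw [hgi, hgj]
  unfold pqStep pqLeD
  by_cases hc : e.getD i 0 > e.getD j 0
  · rw [if_pos hc, if_neg (by simpa using hc)]
    unfold pvSwap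
    rw [hgi, hgj]
    simp only [PySem.List.pySetD_natCast]
    have h1 : (pvInterleave e o).set (2 * j) (e.getD i 0) = pvInterleave (e.set j (e.getD i 0)) o := by
      have := hset j (e.getD i 0) hj
      rwa [List.getD_eq_getElem?_getD] at this
    rw [h1]
    have h2 := hset' i (e.getD j 0) (by simpa using hi)
    rw [h2]
    rfl
  · rw [if_neg hc, if_pos (by simpa using hc)]

theorem stepO_comm (e o : List Int) (hs1 : o.length ≤ e.length) (hs2 : e.length ≤ o.length + 1)
    (i j : Nat) (hi : i < o.length) (hj : j < o.length) :
    (if PySem.List.pyGetD (pvInterleave e o) ((2 * i + 1 : Nat) : Int) 0 <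
        PySem.List.pyGetD (pvInterleave e o) ((2 * j + 1 : Nat) : Int) 0
     then pvSwap (pvInterleave e o) ((2 * i + 1 : Nat) : Int) ((2 * j + 1 : Nat) : Int)
     else pvInterleave e o)
    = pvInterleave e (pqStep pqLeA i o j) := by
  have hget := (pvInterleave_getD (e.length + o.length) e o (Nat.le_refl _) hs1 hs2).2
  have hset := (pvInterleave_set (e.length + o.length) e o (Nat.le_refl _) hs1 hs2).2
  have hset' := (pvInterleave_set (e.length + o.length) e (o.set j (o.getD i 0))
      (by simp) (by simpa using hs1) (by simpa using hs2)).2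
  have hgi : PySem.List.pyGetD (pvInterleave e o) ((2 * i + 1 : Nat) : Int) 0 = o.getD i 0 := by
    rw [PySem.List.pyGetD_natCast]
    have := hget i 0 hi
    rwa [List.getD_eq_getElem?_getD, List.getD_eq_getElem?_getD] at this ⊢
  have hgj : PySem.List.pyGetD (pvInterleave e o) ((2 * j + 1 : Nat) : Int) 0 = o.getD j 0 := by
    rw [PySem.List.pyGetD_natCast]
    have := hget j 0 hj
    rwa [List.getD_eq_getElem?_getD, List.getD_eq_getElem?_getD] at this ⊢
  rw [hgi, hgj]
  unfold pqStep pqLeA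
  by_cases hc : o.getD i 0 < o.getD j 0
  · rw [if_pos hc, if_neg (by simpa using hc)]
    unfold pvSwap
    rw [hgi, hgj]
    simp only [PySem.List.pySetD_natCast]
    have h1 : (pvInterleave e o).set (2 * j + 1) (o.getD i 0) = pvInterleave e (o.set j (o.getD i 0)) := by
      have := hset j (o.getD i 0) hj
      rwa [List.getD_eq_getElem?_getD] at this
    rw [h1]
    have h2 := hset' i (o.getD j 0) (by simpa using hi)
    rw [h2]
    rfl
  · rw [if_neg hc, if_pos (by simpa using hc)]

theorem innerE_comm (t : Nat) : ∀ (J : Nat) (e o : List Int),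
    o.length ≤ e.length → e.length ≤ o.length + 1 → t < e.length → J ≤ e.length →
    (List.range J).foldl (fun (a : List Int) (k : Nat) =>
        if PySem.List.pyGetD a ((2 * t : Nat) : Int) 0 >
           PySem.List.pyGetD a ((0 : Int) + 2 * (k : Int)) 0
        then pvSwap a ((2 * t : Nat) : Int) ((0 : Int) + 2 * (k : Int)) else a)
      (pvInterleave e o)
    = pvInterleave ((List.range J).foldl (pqStep pqLeD t) e) o := by
  intro J
  induction J with
  | zero => intro e o _ _ _ _; rfl
  | succ J ih =>
    intro e o hs1 hs2 ht hJ
    rw [List.range_succ, List.foldl_append, List.foldl_cons, List.foldl_nil,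
      List.foldl_append, List.foldl_cons, List.foldl_nil]
    rw [ih e o hs1 hs2 ht (by omega)]
    have hcast : ((0 : Int) + 2 * (J : Int)) = ((2 * J : Nat) : Int) := by push_cast; ring
    rw [hcast]
    set eJ := (List.range J).foldl (pqStep pqLeD t) e with heJ
    have hlen : eJ.length = e.length := length_foldl_pqStep pqLeD t _ e
    exact stepE_comm eJ o (by omega) (by omega) t J (by omega) (by omega)

theorem innerO_comm (t : Nat) : ∀ (J : Nat) (e o : List Int),
    o.length ≤ e.length → e.length ≤ o.length + 1 → t < o.length → J ≤ o.length →
    (List.range J).foldl (fun (a : List Int) (k : Nat) =>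
        if PySem.List.pyGetD a ((2 * t + 1 : Nat) : Int) 0 <
           PySem.List.pyGetD a ((1 : Int) + 2 * (k : Int)) 0
        then pvSwap a ((2 * t + 1 : Nat) : Int) ((1 : Int) + 2 * (k : Int)) else a)
      (pvInterleave e o)
    = pvInterleave e ((List.range J).foldl (pqStep pqLeA t) o) := by
  intro J
  induction J with
  | zero => intro e o _ _ _ _; rfl
  | succ J ih =>
    intro e o hs1 hs2 ht hJ
    rw [List.range_succ, List.foldl_append, List.foldl_cons, List.foldl_nil,
      List.foldl_append, List.foldl_cons, List.foldl_nil]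
    rw [ih e o hs1 hs2 ht (by omega)]
    have hcast : ((1 : Int) + 2 * (J : Int)) = ((2 * J + 1 : Nat) : Int) := by push_cast; ring
    rw [hcast]
    set oJ := (List.range J).foldl (pqStep pqLeA t) o with hoJ
    have hlen : oJ.length = o.length := length_foldl_pqStep pqLeA t _ o
    exact stepO_comm e oJ (by omega) (by omega) t J (by omega) (by omega)

theorem pmod2_even (t : Nat) : PySem.Int.mod ((2 * t : Nat) : Int) 2 = 0 := by
  simp [PySem.Int.mod]

theorem pmod2_odd (t : Nat) : PySem.Int.mod ((2 * t + 1 : Nat) : Int) 2 = 1 := by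
  simp [PySem.Int.mod]

theorem rangeE (N : Nat) : PySem.List.pyRange 0 (N : Int) 2
    = (List.range ((N + 1) / 2)).map (fun (k : Nat) => (0 : Int) + 2 * (k : Int)) := by
  rw [PySem.List.pyRange_of_pos 0 (N : Int) (by norm_num)]
  have hc : (if (0 : Int) < (N : Int) then (((N : Int) - 0 + 2 - 1) / 2).toNat else 0)
      = (N + 1) / 2 := by split_ifs with h <;> omega
  rw [hc]

theorem rangeO (N : Nat) : PySem.List.pyRange 1 ((N : Int) - 1) 2
    = (List.range ((N - 1) / 2)).map (fun (k : Nat) => (1 : Int) + 2 * (k : Int)) := by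
  rw [PySem.List.pyRange_of_pos 1 ((N : Int) - 1) (by norm_num)]
  have hc : (if (1 : Int) < (N : Int) - 1 then (((N : Int) - 1 - 1 + 2 - 1) / 2).toNat else 0)
      = (N - 1) / 2 := by split_ifs with h <;> omega
  rw [hc]

theorem pqAStep_even (N t : Nat) (a : List Int) :
    pqAStep N a (2 * t) = (List.range ((N + 1) / 2)).foldl (fun (a : List Int) (k : Nat) =>
      if PySem.List.pyGetD a ((2 * t : Nat) : Int) 0 >
         PySem.List.pyGetD a ((0 : Int) + 2 * (k : Int)) 0
      then pvSwap a ((2 * t : Nat) : Int) ((0 : Int) + 2 * (k : Int)) else a) a := by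
  unfold pqAStep
  simp only [pmod2_even, sub_zero]
  rw [rangeE, List.foldl_map]
  simp

theorem pqAStep_odd (N t : Nat) (a : List Int) :
    pqAStep N a (2 * t + 1) = (List.range ((N - 1) / 2)).foldl (fun (a : List Int) (k : Nat) =>
      if PySem.List.pyGetD a ((2 * t + 1 : Nat) : Int) 0 <
         PySem.List.pyGetD a ((1 : Int) + 2 * (k : Int)) 0
      then pvSwap a ((2 * t + 1 : Nat) : Int) ((1 : Int) + 2 * (k : Int)) else a) a := by
  unfold pqAStep
  simp only [pmod2_odd]
  rw [rangeO, List.foldl_map]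
  simp

theorem outer_comm (N : Nat) : ∀ (K : Nat) (e o : List Int),
    e.length = (N + 1) / 2 → o.length = N / 2 → K ≤ N →
    (List.range K).foldl (pqAStep N) (pvInterleave e o)
    = pvInterleave (pqSort pqLeD ((N + 1) / 2) ((K + 1) / 2) e)
        (pqSort pqLeA ((N - 1) / 2) (K / 2) o) := by
  intro K
  induction K with
  | zero => intro e o he ho _; rfl
  | succ K ih =>
    intro e o he ho hK
    rw [List.range_succ, List.foldl_append, List.foldl_cons, List.foldl_nil,
      ih e o he ho (by omega)]
    rcases Nat.even_or_odd K with hev | hod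
    · obtain ⟨t, ht⟩ := hev
      have ht2 : K = 2 * t := by omega
      subst ht2
      simp only [show (2 * t + 1) / 2 = t from by omega,
        show (2 * t) / 2 = t from by omega,
        show (2 * t + 1 + 1) / 2 = t + 1 from by omega]
      have hle : (pqSort pqLeD ((N + 1) / 2) t e).length = e.length := length_pqSort _ _ _ _
      have hlo : (pqSort pqLeA ((N - 1) / 2) t o).length = o.length := length_pqSort _ _ _ _
      rw [pqAStep_even]
      rw [innerE_comm t ((N + 1) / 2) (pqSort pqLeD ((N + 1) / 2) t e)
        (pqSort pqLeA ((N - 1) / 2) t o) (by omega) (by omega) (by omega) (by omega)]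
      simp only [pqSort_succ]
      rfl
    · obtain ⟨t, ht⟩ := hod
      subst ht
      simp only [show (2 * t + 1) / 2 = t from by omega,
        show (2 * t + 1 + 1) / 2 = t + 1 from by omega,
        show (2 * t + 1 + 1 + 1) / 2 = t + 1 from by omega]
      have hle : (pqSort pqLeD ((N + 1) / 2) (t + 1) e).length = e.length := length_pqSort _ _ _ _
      have hlo : (pqSort pqLeA ((N - 1) / 2) t o).length = o.length := length_pqSort _ _ _ _
      rw [pqAStep_odd]
      rw [innerO_comm t ((N - 1) / 2) (pqSort pqLeD ((N + 1) / 2) (t + 1) e)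
        (pqSort pqLeA ((N - 1) / 2) t o) (by omega) (by omega) (by omega) (by omega)]
      simp only [pqSort_succ]
      rfl

theorem A_bridge (arr : List Int) :
    rearrangeOddEven arr = (List.range arr.length).foldl (pqAStep arr.length) arr := by
  simp only [rearrangeOddEven]
  rw [PySem.List.pyRange_one]
  simp only [sub_zero, Int.toNat_natCast]
  rw [List.foldl_map]
  congr 1
  funext a k
  simp only [pqAStep, zero_add]

theorem A_eq (arr : List Int) :
    rearrangeOddEven arr
    = pvInterleave
        (pqSort pqLeD ((arr.length + 1) / 2) ((arr.length + 1) / 2) (pqDe arr).1)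
        (pqSort pqLeA ((arr.length - 1) / 2) (arr.length / 2) (pqDe arr).2) := by
  have he := (pqDe_len arr).1
  have ho := (pqDe_len arr).2
  have h := outer_comm arr.length arr.length (pqDe arr).1 (pqDe arr).2 he ho (Nat.le_refl _)
  rw [pvInterleave_pqDe arr] at h
  rw [A_bridge, h]

theorem filterE (arr : List Int) : ∀ C : Nat,
    List.filterMap (fun x => arr[2 * x]?) (List.range C) = (pqDe arr).1.take C := by
  intro C
  induction C with
  | zero => simp
  | succ C ih =>
    rw [List.range_succ, List.filterMap_append, ih, List.take_add_one, (pqDe_get arr C).1]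
    congr 1

theorem sliceE (arr : List Int) :
    PySem.List.slice? arr (some 0) none 2 = some (pqDe arr).1 := by
  unfold PySem.List.slice? PySem.List.sliceIndices
  norm_num
  have hc : (if 0 < arr.length then (((arr.length : Int) + 2 - 1) / 2).toNat else 0)
      = (arr.length + 1) / 2 := by split_ifs <;> omega
  rw [hc]
  have hidx : ∀ x : Nat, ((2 * (x : Int)).toNat) = 2 * x := by intro x; omega
  simp only [hidx]
  rw [filterE]
  rw [← (pqDe_len arr).1, List.take_length]

theorem sliceO (arr : List Int) :
    PySem.List.slice? arr (some 1) none 2 = some (pqDe arr).2 := by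
  cases arr with
  | nil => rfl
  | cons x xs =>
    unfold PySem.List.slice? PySem.List.sliceIndices
    norm_num
    have hc : (if 0 < xs.length then (((xs.length : Int) + 2 - 1) / 2).toNat else 0)
        = (xs.length + 1) / 2 := by split_ifs <;> omega
    rw [hc]
    have hidx : ∀ k : Nat, ((1 + 2 * (k : Int)).toNat) = 2 * k + 1 := by intro k; omega
    simp only [hidx, List.getElem?_cons_succ]
    rw [filterE]
    rw [← (pqDe_len xs).1, List.take_length]
    simp [pqDe]

theorem B_eq (arr : List Int) :
    rearrangeOddEven_alt arr
    = pvInterleave (PySem.List.sorted (pqDe arr).1 (fun x => x) true)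
        (PySem.List.sorted (pqDe arr).2 (fun x => x) false) := by
  simp only [rearrangeOddEven_alt, sliceE, sliceO, Option.getD_some]

theorem sortD_eq (l : List Int) :
    pqSort pqLeD l.length l.length l = PySem.List.sorted l (fun x => x) true := by
  obtain ⟨hperm, hpre⟩ :=
    pqSort_spec pqLeD htotD htransD l.length l.length l (Nat.le_refl _) rfl (by omega)
  apply PySem.List.eq_of_perm_of_pairwise_le_of_injective (fun x : Int => -x) neg_injective
  · exact hperm.trans (PySem.List.sorted_perm l (fun x => x) true).symm
  · have hp := pqSortedPre_pairwise pqLeD (pqSort pqLeD l.length l.length l)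
      (by rw [length_pqSort]; exact hpre)
    exact hp.imp (fun h => by simp only [pqLeD, decide_eq_true_eq] at h; omega)
  · have hp := PySem.List.sorted_pairwise_rev (xs := l) (key := fun x : Int => x)
    exact hp.imp (fun h => by simpa using h)

theorem sortA_eq (l : List Int) (m : Nat) (hm : m ≤ l.length) (hcm : l.length ≤ m + 1) :
    pqSort pqLeA m l.length l = PySem.List.sorted l (fun x => x) false := by
  obtain ⟨hperm, hpre⟩ := pqSort_spec pqLeA htotA htransA m l.length l hm rfl hcm
  apply PySem.List.eq_of_perm_of_pairwise_le_of_injective (fun x : Int => x)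
    (fun a b h => h)
  · exact hperm.trans (PySem.List.sorted_perm l (fun x => x) false).symm
  · have hp := pqSortedPre_pairwise pqLeA (pqSort pqLeA m l.length l)
      (by rw [length_pqSort]; exact hpre)
    exact hp.imp (fun h => by simpa [pqLeA] using h)
  · exact PySem.List.sorted_pairwise (xs := l) (key := fun x : Int => x)

-- ===== VERDICT (by name: the statement is the Claim_ definition above) =====
theorem rearrangeOddEven_spec : Claim_equal_rearrangeOddEven := by
  intro arr _
  unfold Spec_rearrangeOddEven
  rw [A_eq, B_eq]
  have he := (pqDe_len arr).1
  have ho := (pqDe_len arr).2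
  have h1 : pqSort pqLeD ((arr.length + 1) / 2) ((arr.length + 1) / 2) (pqDe arr).1
      = PySem.List.sorted (pqDe arr).1 (fun x => x) true := by
    rw [← he]; exact sortD_eq _
  have h2 : pqSort pqLeA ((arr.length - 1) / 2) (arr.length / 2) (pqDe arr).2
      = PySem.List.sorted (pqDe arr).2 (fun x => x) false := by
    rw [show arr.length / 2 = (pqDe arr).2.length from ho.symm]
    exact sortA_eq _ _ (by omega) (by omega)
  rw [h1, h2]
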